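-- pv_equiv track=rewrite | github.com/piperun/randomStuff | cracker.py | generate_word
-- ===== SOURCE A (Python) =====
-- def generate_word(vowels, consonants):
--     word = ""
--     for i in range(max(len(vowels), len(consonants))):
--         if i < len(vowels):
--             word += vowels[i]
--         if i < len(consonants):
--             word += consonants[i]
--     return word
-- ===== SOURCE B (Python) =====
-- def generate_word(vowels, consonants):
--     common = ''.join(v + c for v, c in zip(vowels, consonants))
--     m = min(len(vowels), len(consonants))
--     return common + vowels[m:] + consonants[m:]
-- ===== Notes on version B (the rewrite author's own statement) =====
-- stated objective: simpler
-- what changed: Replaces the index loop over range(max(len,len)) with two bounds checks and repeated string += by a zip-join of the common prefix plus appending the leftover tail slices of the longer string.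
import Mathlib
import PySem

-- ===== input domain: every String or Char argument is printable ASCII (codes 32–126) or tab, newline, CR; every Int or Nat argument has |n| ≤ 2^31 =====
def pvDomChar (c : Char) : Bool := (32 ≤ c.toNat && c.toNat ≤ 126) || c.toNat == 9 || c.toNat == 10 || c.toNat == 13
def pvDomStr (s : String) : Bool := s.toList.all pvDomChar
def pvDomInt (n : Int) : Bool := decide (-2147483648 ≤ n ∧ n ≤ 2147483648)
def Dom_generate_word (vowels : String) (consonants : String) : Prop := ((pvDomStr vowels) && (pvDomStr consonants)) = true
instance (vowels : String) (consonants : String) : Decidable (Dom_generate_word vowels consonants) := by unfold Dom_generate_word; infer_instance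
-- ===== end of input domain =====

-- B interleaves via zip plus leftover tail slices instead of A's index loop with two bounds checks; objective: simpler.

-- ===== PORT A =====
-- for i in range(max(len(vowels), len(consonants))): if i < len(v): word += v[i]; if i < len(c): word += c[i]
-- the guards keep every index in range, so pyGetD's default ' ' is never used
def generate_word (vowels : String) (consonants : String) : String :=
  let vs := vowels.toList
  let cs := consonants.toList
  ((PySem.List.pyRange 0 (max (vs.length : Int) (cs.length : Int)) 1).foldl
    (fun (word : List Char) (i : Int) =>
      let word := if i < (vs.length : Int) then word ++ [PySem.List.pyGetD vs i ' '] else word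
      if i < (cs.length : Int) then word ++ [PySem.List.pyGetD cs i ' '] else word)
    []) |> String.ofList

-- ===== PORT B =====
-- common = ''.join(v + c for v, c in zip(vowels, consonants)); m = min(len, len); common + vowels[m:] + consonants[m:]
-- the slice s[m:] with 0 ≤ m is exactly List.drop m
def generate_word_alt (vowels : String) (consonants : String) : String :=
  let vs := vowels.toList
  let cs := consonants.toList
  let common := (vs.zip cs).flatMap (fun p => [p.1, p.2])
  let m := min vs.length cs.length
  (common ++ vs.drop m ++ cs.drop m) |> String.ofList

-- ===== PRECONDITION & SPEC =====
def Spec_generate_word (vowels : String) (consonants : String) (out : String) : Prop := out = generate_word_alt vowels consonants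
instance (vowels : String) (consonants : String) (out : String) : Decidable (Spec_generate_word vowels consonants out) := by unfold Spec_generate_word; infer_instance

-- ===== CLAIM (what is proved, stated in full; the proofs are below) =====
def Claim_equal_generate_word : Prop := ∀ (vowels : String) (consonants : String), Dom_generate_word vowels consonants → Spec_generate_word vowels consonants (generate_word vowels consonants)

-- ===== LEMMAS AND PROOFS =====

-- the two guarded appends of A's loop body are one append of a guarded pair
theorem pv_body (lv lc : Int) (vs cs : List Char) :
    (fun (word : List Char) (i : Int) =>
      let word := if i < lv then word ++ [PySem.List.pyGetD vs i ' '] else word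
      if i < lc then word ++ [PySem.List.pyGetD cs i ' '] else word)
    = fun word i => word ++ ((if i < lv then [PySem.List.pyGetD vs i ' '] else [])
                          ++ (if i < lc then [PySem.List.pyGetD cs i ' '] else [])) := by
  funext w i
  dsimp only
  split_ifs <;> simp

-- with only one list left, the guarded loop body just copies the list
theorem pv_flatMap_range_self (l : List Char) :
    (List.range l.length).flatMap
      (fun k => if k < l.length then [l.getD k ' '] else []) = l := by
  induction l with
  | nil => simp
  | cons a l ih =>
    rw [List.length_cons, List.range_succ_eq_map]
    simp only [List.flatMap_cons, List.flatMap_map, Nat.succ_eq_add_one,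
      Nat.add_lt_add_iff_right, List.getD_cons_succ, List.getD_cons_zero]
    simpa using ih

-- the body of A's loop, written with Nat indices, produces B's prefix-plus-tails decomposition
theorem pv_key (vs cs : List Char) :
    (List.range (max vs.length cs.length)).flatMap
      (fun k => (if k < vs.length then [vs.getD k ' '] else [])
             ++ (if k < cs.length then [cs.getD k ' '] else []))
    = (vs.zip cs).flatMap (fun p => [p.1, p.2])
        ++ vs.drop (min vs.length cs.length) ++ cs.drop (min vs.length cs.length) := by
  induction vs generalizing cs with
  | nil => simpa using pv_flatMap_range_self cs
  | cons v vs ih =>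
    cases cs with
    | nil => simpa using pv_flatMap_range_self (v :: vs)
    | cons c cs =>
      have hm : max (v :: vs).length (c :: cs).length = max vs.length cs.length + 1 := by
        simp [Nat.succ_max_succ]
      rw [hm, List.range_succ_eq_map]
      simp only [List.flatMap_cons, List.flatMap_map, Nat.succ_eq_add_one,
        List.length_cons, Nat.add_lt_add_iff_right, List.getD_cons_succ, List.getD_cons_zero]
      simpa using ih cs

theorem generate_word_spec : Claim_equal_generate_word := by
  intro vowels consonants _
  unfold Spec_generate_word generate_word generate_word_alt
  dsimp only
  rw [pv_body, PySem.List.foldl_append_eq_flatMap, List.nil_append,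
    ← Nat.cast_max, PySem.List.pyRange_zero_natCast, List.flatMap_map]
  rw [show (fun (k : Nat) =>
        (if (k : Int) < (vowels.toList.length : Int) then [PySem.List.pyGetD vowels.toList (k : Int) ' '] else [])
        ++ (if (k : Int) < (consonants.toList.length : Int) then [PySem.List.pyGetD consonants.toList (k : Int) ' '] else []))
      = (fun (k : Nat) =>
        (if k < vowels.toList.length then [vowels.toList.getD k ' '] else [])
        ++ (if k < consonants.toList.length then [consonants.toList.getD k ' '] else [])) from by
    funext k; simp]
  rw [pv_key]
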